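-- pv_equiv track=rewrite | github.com/ErAshishChawla/dsa-python | assignments/Week-7/Contest/q8.py | maxFrequencyChar
-- ===== SOURCE A (Python) =====
-- def maxFrequencyChar(string: str) -> str:
--     freq = {}
--     max_freq_char = ""
--     max_freq = 0
--
--     for chr in string:
--         if chr in freq:
--             freq[chr] += 1
--         else:
--             freq[chr] = 1
--
--         if freq[chr] > max_freq:
--             max_freq = freq[chr]
--             max_freq_char = chr
--
--     return max_freq_char
-- ===== SOURCE B (Python) =====
-- def maxFrequencyChar(string: str) -> str:
--     if not string:
--         return ""
--     freq = {}
--     for ch in string: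
--         freq[ch] = freq.get(ch, 0) + 1
--     target = max(freq.values())
--     running = {}
--     for ch in string:
--         running[ch] = running.get(ch, 0) + 1
--         if running[ch] == target:
--             return ch
--     return ""  # unreachable: target is attained
-- ===== Notes on version B (the rewrite author's own statement) =====
-- stated objective: alternative
-- what changed: A keeps a running maximum inside a single counting pass; B first builds the full frequency dict, takes M = max(freq.values()), then does a second pass returning the first character whose running count reaches M (guarding the empty string with "").
import Mathlib
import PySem

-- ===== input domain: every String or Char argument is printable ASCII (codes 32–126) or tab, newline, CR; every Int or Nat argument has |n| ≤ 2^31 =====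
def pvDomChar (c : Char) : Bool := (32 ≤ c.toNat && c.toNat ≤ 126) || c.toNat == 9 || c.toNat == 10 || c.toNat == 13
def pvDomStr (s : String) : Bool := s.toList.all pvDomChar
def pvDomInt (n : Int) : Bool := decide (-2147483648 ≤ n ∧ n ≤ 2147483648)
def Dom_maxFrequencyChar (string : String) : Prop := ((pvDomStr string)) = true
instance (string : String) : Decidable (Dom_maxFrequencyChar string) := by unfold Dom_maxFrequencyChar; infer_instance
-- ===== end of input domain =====

-- B replaces A's single running-max pass by two passes (full frequency dict, then first char whose
-- running count reaches the global max): same result, a different decomposition (objective: alternative).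

-- ===== PORT A =====
-- A's loop: state = (freq dict, current best char, current best count), chars consumed left to right.
def pvALoop : List Char → PySem.Dict Char Int → String → Int → String
  | [], _, mc, _ => mc
  | c :: rest, freq, mc, mf =>
    let freq' := if freq.contains c then freq.insert c (freq.getD c 0 + 1)
                 else freq.insert c 1
    let k := freq'.getD c 0
    if k > mf then pvALoop rest freq' (String.ofList [c]) k
    else pvALoop rest freq' mc mf

def maxFrequencyChar (string : String) : String :=
  pvALoop string.toList PySem.Dict.empty "" 0

-- ===== PORT B =====
-- B's second loop: running-count dict, return the first char whose count hits the target.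
-- Python's loop always returns inside the loop for the target B computes; the [] case is its fall-through.
def pvBScan : List Char → PySem.Dict Char Int → Int → String
  | [], _, _ => ""
  | c :: rest, run, t =>
    let run' := run.insert c (run.getD c 0 + 1)
    if run'.getD c 0 = t then String.ofList [c] else pvBScan rest run' t

def maxFrequencyChar_alt (string : String) : String :=
  if string.toList.isEmpty then ""
  else
    let freq := string.toList.foldl (fun d c => d.insert c (d.getD c 0 + 1)) PySem.Dict.empty
    -- max(freq.values()); freq is nonempty here, so the max exists and getD 0 never fires
    let target := (PySem.List.max? freq.values (fun v => v)).getD 0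
    pvBScan string.toList PySem.Dict.empty target

-- ===== PRECONDITION & SPEC =====
def Spec_maxFrequencyChar (string : String) (out : String) : Prop := out = maxFrequencyChar_alt string
instance (string : String) (out : String) : Decidable (Spec_maxFrequencyChar string out) := by unfold Spec_maxFrequencyChar; infer_instance

-- ===== CLAIM (what is proved, stated in full; the proofs are below) =====
def Claim_equal_maxFrequencyChar : Prop := ∀ (string : String), Dom_maxFrequencyChar string → Spec_maxFrequencyChar string (maxFrequencyChar string)

-- ===== LEMMAS AND PROOFS =====

-- Pure model of B's second loop: first char whose running count (seen so far) reaches t.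
def scanP : List Char → List Char → Int → String
  | [], _, _ => ""
  | c :: rest, seen, t =>
    if ((seen.count c : Int) + 1 = t) then String.ofList [c] else scanP rest (seen ++ [c]) t

def BoundCnt (s : List Char) (M : Int) : Prop := ∀ c, ((s.count c : Int)) ≤ M
def AttainCnt (s : List Char) (M : Int) : Prop :=
  (s = [] ∧ M = 0) ∨ ∃ c, c ∈ s ∧ ((s.count c : Int)) = M

theorem ofList_singleton_ne_empty (c : Char) : String.ofList [c] ≠ "" := by simp

theorem scanP_append (p q seen : List Char) (t : Int) :
    scanP (p ++ q) seen t =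
      (if scanP p seen t = "" then scanP q (seen ++ p) t else scanP p seen t) := by
  induction p generalizing seen with
  | nil => simp [scanP]
  | cons c rest ih =>
    rw [List.cons_append, scanP, scanP]
    by_cases h : ((seen.count c : Int) + 1 = t)
    · rw [if_pos h, if_pos h, if_neg (ofList_singleton_ne_empty c)]
    · rw [if_neg h, if_neg h, ih, List.append_assoc]
      rfl

theorem scanP_all_lt (p : List Char) :
    ∀ (seen : List Char) (t : Int), (∀ c, (((seen ++ p).count c : Int)) < t) →
      scanP p seen t = "" := by
  induction p with
  | nil => intro seen t h; rfl
  | cons c rest ih =>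
    intro seen t h
    have hc := h c
    simp [List.count_append] at hc
    rw [scanP, if_neg (by omega)]
    apply ih
    intro c'
    have := h c'
    simp [List.count_append, List.count_cons] at this ⊢
    split_ifs at this ⊢ <;> omega

theorem scanP_ne_empty (p : List Char) :
    ∀ (seen : List Char) (t : Int) (c₀ : Char), c₀ ∈ p →
      t ≤ (((seen ++ p).count c₀ : Int)) → (∀ c, ((seen.count c : Int)) < t) →
      scanP p seen t ≠ "" := by
  induction p with
  | nil => intro _ _ _ h; cases h
  | cons c rest ih =>
    intro seen t c₀ hmem hcnt hseen
    rw [scanP]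
    split_ifs with hfire
    · exact ofList_singleton_ne_empty c
    · have hseen' : ∀ c', (((seen ++ [c]).count c' : Int)) < t := by
        intro c'
        by_cases he : c' = c
        · subst he
          have h2 := hseen c'
          have h3 : (seen ++ [c']).count c' = seen.count c' + 1 := by simp
          rw [h3]; push_cast; omega
        · have h2 := hseen c'
          have h3 : (seen ++ [c]).count c' = seen.count c' := by
            simp [List.count_eq_zero.mpr (by simp [he] : c' ∉ [c])]
          rw [h3]; omega
      rcases List.mem_cons.mp hmem with rfl | hmem'
      · by_cases hrest : c₀ ∈ rest
        · exact ih (seen ++ [c₀]) t c₀ hrest (by simpa [List.append_assoc] using hcnt) hseen'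
        · exfalso
          have h4 : (seen ++ c₀ :: rest).count c₀ = seen.count c₀ + 1 := by
            simp [List.count_eq_zero.mpr hrest]
          rw [h4] at hcnt
          have h5 := hseen c₀
          push_cast at hcnt
          omega
      · exact ih (seen ++ [c]) t c₀ hmem' (by simpa [List.append_assoc] using hcnt) hseen'

theorem max_unique {s : List Char} {M M' : Int}
    (hb : BoundCnt s M) (ha : AttainCnt s M) (hb' : BoundCnt s M') (ha' : AttainCnt s M') :
    M = M' := by
  rcases ha with ⟨rfl, rfl⟩ | ⟨c, hc, hcc⟩
  · rcases ha' with ⟨_, rfl⟩ | ⟨c', hc', _⟩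
    · rfl
    · cases hc'
  · rcases ha' with ⟨rfl, rfl⟩ | ⟨c', hc', hcc'⟩
    · cases hc
    · have h1 := hb c'
      have h2 := hb' c
      omega

theorem getD_step (d : PySem.Dict Char Int) (c c' : Char) :
    ((if d.contains c then d.insert c (d.getD c 0 + 1) else d.insert c 1).getD c' 0)
      = if c' = c then d.getD c 0 + 1 else d.getD c' 0 := by
  by_cases h : d.contains c = true
  · simp [h, PySem.Dict.getD_insert]
  · simp only [Bool.not_eq_true] at h
    rw [if_neg (by simp [h]), PySem.Dict.getD_insert]
    split_ifs with he
    · subst he; rw [PySem.Dict.getD_of_not_contains d 0 h]; ring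
    · rfl

theorem count_append_self (p : List Char) (c : Char) :
    (p ++ [c]).count c = p.count c + 1 := by simp

theorem count_append_ne (p : List Char) (c c' : Char) (h : c' ≠ c) :
    (p ++ [c]).count c' = p.count c' := by
  simp [List.count_eq_zero.mpr (by simp [h] : c' ∉ [c])]

theorem aLoop_eq (rest : List Char) :
    ∀ (p : List Char) (d : PySem.Dict Char Int) (mc : String) (mf : Int),
      (∀ c, d.getD c 0 = (p.count c : Int)) →
      BoundCnt p mf → AttainCnt p mf →
      mc = scanP p [] mf →
      ∃ M, BoundCnt (p ++ rest) M ∧ AttainCnt (p ++ rest) M ∧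
        pvALoop rest d mc mf = scanP (p ++ rest) [] M := by
  induction rest with
  | nil =>
    intro p d mc mf _ hb ha hmc
    exact ⟨mf, by simpa using hb, by simpa using ha, by simpa [pvALoop] using hmc⟩
  | cons c rest ih =>
    intro p d mc mf hd hb ha hmc
    have hstep : ∀ c', ((if d.contains c then d.insert c (d.getD c 0 + 1) else d.insert c 1).getD c' 0)
        = (((p ++ [c]).count c' : Int)) := by
      intro c'
      rw [getD_step]
      by_cases he : c' = c
      · subst he
        rw [if_pos rfl, hd, count_append_self]; push_cast; ring
      · rw [if_neg he, hd, count_append_ne p c c' he]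
    have hk : ((if d.contains c then d.insert c (d.getD c 0 + 1) else d.insert c 1).getD c 0)
        = (p.count c : Int) + 1 := by
      rw [getD_step, if_pos rfl, hd]
    rw [pvALoop]
    set d' := (if d.contains c then d.insert c (d.getD c 0 + 1) else d.insert c 1) with hd'eq
    rw [show d'.getD c 0 = (p.count c : Int) + 1 from hd'eq ▸ hk]
    split_ifs with hgt
    · -- new max k = count p c + 1
      have hb' : BoundCnt (p ++ [c]) ((p.count c : Int) + 1) := by
        intro c'
        by_cases he : c' = c
        · subst he; rw [count_append_self]; push_cast; omega
        · rw [count_append_ne p c c' he]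
          have := hb c'
          omega
      have ha' : AttainCnt (p ++ [c]) ((p.count c : Int) + 1) := by
        right
        refine ⟨c, by simp, ?_⟩
        rw [count_append_self]; push_cast; ring
      have hmc' : String.ofList [c] = scanP (p ++ [c]) [] ((p.count c : Int) + 1) := by
        rw [scanP_append]
        have hnil : scanP p [] ((p.count c : Int) + 1) = "" := by
          apply scanP_all_lt
          intro c'
          have := hb c'
          simp only [List.nil_append]
          omega
        rw [if_pos hnil]
        simp [scanP]
      have := ih (p ++ [c]) d' _ _ (fun c' => hd'eq ▸ hstep c') hb' ha' hmc'
      simpa [List.append_assoc] using this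
    · -- k ≤ mf : max unchanged
      have hle : (p.count c : Int) + 1 ≤ mf := by omega
      have hmf1 : (1 : Int) ≤ mf := by
        have : (0 : Int) ≤ (p.count c : Int) := by positivity
        omega
      rcases ha with ⟨_, rfl⟩ | ⟨c₀, hc₀, hcc₀⟩
      · omega
      have hne : c₀ ≠ c := by
        intro he; subst he
        rw [hcc₀] at hle; omega
      have hb' : BoundCnt (p ++ [c]) mf := by
        intro c'
        by_cases he : c' = c
        · subst he; rw [count_append_self]; push_cast; omega
        · rw [count_append_ne p c c' he]
          have := hb c'
          omega
      have ha' : AttainCnt (p ++ [c]) mf := by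
        right
        exact ⟨c₀, by simp [hc₀], by rw [count_append_ne p c c₀ hne]; exact hcc₀⟩
      have hmc' : mc = scanP (p ++ [c]) [] mf := by
        rw [scanP_append]
        have hne' : scanP p [] mf ≠ "" := by
          apply scanP_ne_empty p [] mf c₀ hc₀
          · simpa using le_of_eq hcc₀.symm
          · intro c'; simp; omega
        rw [if_neg hne', hmc]
      have := ih (p ++ [c]) d' _ _ (fun c' => hd'eq ▸ hstep c') hb' ha' hmc'
      simpa [List.append_assoc] using this

theorem bScan_eq (p : List Char) :
    ∀ (seen : List Char) (run : PySem.Dict Char Int) (t : Int),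
      (∀ c, run.getD c 0 = (seen.count c : Int)) →
      pvBScan p run t = scanP p seen t := by
  induction p with
  | nil => intro _ _ _ _; rfl
  | cons c rest ih =>
    intro seen run t hrun
    rw [pvBScan, scanP]
    simp only [PySem.Dict.getD_insert_self, hrun]
    split_ifs with h
    · rfl
    · apply ih
      intro c'
      rw [PySem.Dict.getD_insert]
      split_ifs with he
      · subst he; simp [List.count_append]
      · simp [List.count_append, Ne.symm he, hrun]

-- B's first pass is Counter(string); its target is THE max count (bounded and attained).
theorem target_spec (l : List Char) (hl : l ≠ []) :
    BoundCnt l ((PySem.List.max? (l.foldl (fun d c => d.insert c (d.getD c 0 + 1)) PySem.Dict.empty).values (fun v => v)).getD 0)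
    ∧ AttainCnt l ((PySem.List.max? (l.foldl (fun d c => d.insert c (d.getD c 0 + 1)) PySem.Dict.empty).values (fun v => v)).getD 0) := by
  rw [PySem.Dict.foldl_insert_getD_add_one_eq_counter]
  have hvals : (PySem.Dict.counter l).values = (PySem.Set.ofList l).map (fun k => ((l.count k : Int))) := by
    show ((PySem.Dict.counter l).items.map Prod.snd) = _
    rw [PySem.Dict.items_counter]
    simp [List.map_map, Function.comp]
  obtain ⟨c1, hc1⟩ := List.exists_mem_of_ne_nil l hl
  have hmem1 : ((l.count c1 : Int)) ∈ (PySem.Dict.counter l).values := by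
    rw [hvals]
    exact List.mem_map.mpr ⟨c1, (PySem.Set.mem_ofList _ _).mpr hc1, rfl⟩
  obtain ⟨m, hm⟩ : ∃ m, PySem.List.max? (PySem.Dict.counter l).values (fun v => v) = some m := by
    cases hq : PySem.List.max? (PySem.Dict.counter l).values (fun v => v) with
    | none =>
      rw [PySem.List.max?_eq_none_iff] at hq
      rw [hq] at hmem1; cases hmem1
    | some m => exact ⟨m, rfl⟩
  rw [hm]
  simp only [Option.getD_some]
  constructor
  · intro c
    by_cases hc : c ∈ l
    · have : ((l.count c : Int)) ∈ (PySem.Dict.counter l).values := by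
        rw [hvals]
        exact List.mem_map.mpr ⟨c, (PySem.Set.mem_ofList _ _).mpr hc, rfl⟩
      exact PySem.List.max?_isMax hm _ this
    · have h0 : l.count c = 0 := List.count_eq_zero.mpr hc
      have h1 : (0:Int) ≤ (l.count c1 : Int) := by positivity
      have := PySem.List.max?_isMax hm _ hmem1
      rw [h0]; push_cast; omega
  · right
    have hmm := PySem.List.max?_mem hm
    rw [hvals] at hmm
    obtain ⟨c₀, hc₀, hval⟩ := List.mem_map.mp hmm
    exact ⟨c₀, (PySem.Set.mem_ofList _ _).mp hc₀, hval⟩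

-- ===== VERDICT (by name: the statement is the Claim_ definition above) =====
theorem maxFrequencyChar_spec : Claim_equal_maxFrequencyChar := by
  intro s _
  unfold Spec_maxFrequencyChar maxFrequencyChar maxFrequencyChar_alt
  by_cases hnil : s.toList = []
  · simp [hnil, pvALoop]
  · rw [if_neg (by simpa using hnil)]
    obtain ⟨M, hbM, haM, hA⟩ :=
      aLoop_eq s.toList [] PySem.Dict.empty "" 0
        (by intro c; simp) (by intro c; simp) (Or.inl ⟨rfl, rfl⟩) rfl
    obtain ⟨hbT, haT⟩ := target_spec s.toList hnil
    rw [bScan_eq s.toList [] _ _ (by intro c; simp)]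
    simp only [List.nil_append] at hA
    rw [hA, max_unique hbM haM hbT haT]
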